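-- pv_equiv track=rewrite | github.com/981377660LMT/algorithm-study | 17_模式匹配/子序列自动机/686. 重复叠加字符串匹配-子序列-邻接表二分查找.py | solve
-- ===== SOURCE A (Python) =====
-- from bisect import bisect_right
-- from collections import defaultdict
--
-- def solve(s, t):
--     def match(hit: int):
--         """判断子序列"""
--         prePos = -1
--         while hit < len(t):
--             nextPos = bisect_right(indexMap[t[hit]], prePos)
--             if nextPos == len(indexMap[t[hit]]):
--                 break
--
--             prePos = indexMap[t[hit]][nextPos]
--             hit += 1
--
--         return hit
--
--     if not set(t) <= (set(s)):
--         return -1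
--
--     indexMap = defaultdict(list)
--     for i, c in enumerate(s):
--         indexMap[c].append(i)
--
--     res = 0
--     hit = 0
--     while hit < len(t):
--         hit = match(hit)
--         res += 1
--     return res
-- ===== SOURCE B (Python) =====
-- def solve(s, t):
--     if not set(t) <= set(s):
--         return -1
--     j = 0
--     res = 0
--     while j < len(t):
--         for c in s:
--             if j < len(t) and t[j] == c:
--                 j += 1
--         res += 1
--     return res
-- ===== Notes on version B (the rewrite author's own statement) =====
-- stated objective: simpler
-- what changed: Replaces the per-character adjacency-list + bisect_right subsequence automaton with a plain greedy linear scan over s per copy, advancing a single pointer into t (no index map, no binary search).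
import Mathlib
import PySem

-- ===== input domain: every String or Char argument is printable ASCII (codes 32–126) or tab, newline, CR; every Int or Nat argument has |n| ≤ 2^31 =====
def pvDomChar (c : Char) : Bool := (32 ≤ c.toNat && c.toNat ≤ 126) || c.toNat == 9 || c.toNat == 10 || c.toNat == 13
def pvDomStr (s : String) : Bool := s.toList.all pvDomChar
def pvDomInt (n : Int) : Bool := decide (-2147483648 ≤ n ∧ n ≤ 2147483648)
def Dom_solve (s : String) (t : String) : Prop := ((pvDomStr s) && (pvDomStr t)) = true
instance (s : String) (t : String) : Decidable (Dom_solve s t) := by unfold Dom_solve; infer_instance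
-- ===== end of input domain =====

-- B replaces A's per-character index lists + bisect_right jumps by a plain greedy
-- left-to-right scan of s per copy (objective: simpler; same return value everywhere).

-- ===== PORT A =====
-- indexMap = defaultdict(list); for i, c in enumerate(s): indexMap[c].append(i)
def buildIndexMap (sl : List Char) : PySem.Dict Char (List Int) :=
  (PySem.List.enumerate sl).foldl (fun d p => d.modify p.2 [] (fun l => l ++ [p.1])) PySem.Dict.empty

-- the inner 'match' closure: while hit < len(t): nextPos = bisect_right(...); break / advance
def matchA (tl : List Char) (im : PySem.Dict Char (List Int)) (prePos : Int) (hit : Nat) : Nat :=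
  if h : hit < tl.length then
    let lst := im.getD tl[hit] []
    let nextPos := PySem.List.bisectRight lst prePos
    if h2 : nextPos < lst.length then
      matchA tl im lst[nextPos] (hit + 1)
    else hit
  else hit
termination_by tl.length - hit
decreasing_by omega

-- outer 'while hit < len(t)' loop; fuel = len(t)+1 bounds the iterations (each
-- match call advances hit by at least one when the subset guard held)
def loopA (tl : List Char) (im : PySem.Dict Char (List Int)) : Nat → Nat → Int → Int
  | 0, _, res => res
  | f + 1, hit, res =>
      if hit < tl.length then loopA tl im f (matchA tl im (-1) hit) (res + 1) else res

def solve (s : String) (t : String) : Int :=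
  let sl := s.toList
  let tl := t.toList
  if !((PySem.Set.ofList tl).issubset (PySem.Set.ofList sl)) then -1
  else loopA tl (buildIndexMap sl) (tl.length + 1) 0 0

-- ===== PORT B =====
-- one 'for c in s' body: if j < len(t) and t[j] == c: j += 1
def stepB (tl : List Char) (j : Nat) (c : Char) : Nat :=
  if h : j < tl.length then (if tl[j] = c then j + 1 else j) else j

def passB (sl tl : List Char) (j : Nat) : Nat := sl.foldl (stepB tl) j

-- outer 'while j < len(t)' loop, same fuel bound as A's port
def loopB (sl tl : List Char) : Nat → Nat → Int → Int
  | 0, _, res => res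
  | f + 1, j, res =>
      if j < tl.length then loopB sl tl f (passB sl tl j) (res + 1) else res

def solve_alt (s : String) (t : String) : Int :=
  let sl := s.toList
  let tl := t.toList
  if !((PySem.Set.ofList tl).issubset (PySem.Set.ofList sl)) then -1
  else loopB sl tl (tl.length + 1) 0 0

-- ===== PRECONDITION & SPEC =====
def Spec_solve (s : String) (t : String) (out : Int) : Prop := out = solve_alt s t
instance (s : String) (t : String) (out : Int) : Decidable (Spec_solve s t out) := by unfold Spec_solve; infer_instance

-- ===== CLAIM (what is proved, stated in full; the proofs are below) =====
def Claim_equal_solve : Prop := ∀ (s : String) (t : String), Dom_solve s t → Spec_solve s t (solve s t)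

-- ===== LEMMAS AND PROOFS =====

-- the list stored for c is exactly the (increasing) list of indices of c in s
def occ (sl : List Char) (c : Char) : List Int :=
  ((PySem.List.enumerate sl).filter (fun p => p.2 == c)).map (fun p => p.1)

lemma buildIndexMap_getD (sl : List Char) (c : Char) :
    (buildIndexMap sl).getD c [] = occ sl c := by
  unfold buildIndexMap occ
  have h := PySem.Dict.getD_foldl_modify_append
      ((PySem.List.enumerate sl).map (fun p => (p.2, p.1))) (PySem.Dict.empty (κ := Char) (ν := List Int)) c
  rw [List.foldl_map] at h
  simp only [h]
  rw [List.filter_map, List.map_map]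
  rfl

lemma occ_pairwise (sl : List Char) (c : Char) : (occ sl c).Pairwise (· < ·) := by
  unfold occ
  refine List.Pairwise.map _ (fun a b h => h) ?_
  exact List.Pairwise.filter _ (PySem.List.pairwise_lt_enumerate sl 0)

lemma mem_occ (sl : List Char) (c : Char) (i : Int) :
    i ∈ occ sl c ↔ ∃ (k : Nat) (hk : k < sl.length), i = (k : Int) ∧ sl[k] = c := by
  unfold occ
  simp only [List.mem_map, List.mem_filter, PySem.List.mem_enumerate_iff]
  constructor
  · rintro ⟨p, ⟨⟨k, hk, rfl⟩, hc⟩, rfl⟩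
    exact ⟨k, hk, by simp, by simpa using hc⟩
  · rintro ⟨k, hk, rfl, hc⟩
    exact ⟨((k : Int), sl[k]), ⟨⟨k, hk, by simp⟩, by simpa using hc⟩, rfl⟩

-- a pass of B's scan does nothing once j has reached len(t)
lemma foldl_stepB_of_done (tl : List Char) (l : List Char) (j : Nat) (h : ¬ j < tl.length) :
    l.foldl (stepB tl) j = j := by
  induction l with
  | nil => rfl
  | cons x xs ih => simp [stepB, h, ih]

-- a pass of B's scan over a stretch of s without t[j] leaves j unchanged
lemma foldl_stepB_stuck (tl : List Char) (l : List Char) (j : Nat) (hj : j < tl.length)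
    (h : ∀ x ∈ l, x ≠ tl[j]) :
    l.foldl (stepB tl) j = j := by
  induction l with
  | nil => rfl
  | cons x xs ih =>
      have hx : tl[j] ≠ x := fun he => (h x (by simp)) he.symm
      simp only [List.foldl_cons, stepB, dif_pos hj, if_neg hx]
      exact ih (fun x hx => h x (by simp [hx]))

-- KEY LEMMA: one call of A's 'match' equals B's single greedy pass over the
-- suffix of s that A's binary searches still look at
lemma matchA_eq_foldl (sl tl : List Char) :
    ∀ (m hit : Nat) (k : Nat) (prePos : Int), tl.length - hit ≤ m → prePos + 1 = (k : Int) →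
      matchA tl (buildIndexMap sl) prePos hit = (sl.drop k).foldl (stepB tl) hit := by
  intro m
  induction m with
  | zero =>
      intro hit k prePos hm hk
      have hge : ¬ hit < tl.length := by omega
      rw [matchA, dif_neg hge, foldl_stepB_of_done tl _ hit hge]
  | succ m ih =>
      intro hit k prePos hm hk
      by_cases h : hit < tl.length
      · rw [matchA, dif_pos h]
        simp only [buildIndexMap_getD]
        set c := tl[hit] with hc
        set lst := occ sl c with hlst
        set np := PySem.List.bisectRight lst prePos with hnp
        have hsorted : lst.Pairwise (· ≤ ·) :=
          (occ_pairwise sl c).imp (fun h => le_of_lt h)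
        obtain ⟨hnple, hbelow, habove⟩ := PySem.List.bisectRight_spec lst prePos hsorted
        by_cases h2 : np < lst.length
        · rw [dif_pos h2]
          -- the found element is the least index ≥ k of c in s
          obtain ⟨ik, hik, hieq, hikc⟩ := (mem_occ sl c lst[np]).mp (List.getElem_mem h2)
          have hgt : prePos < lst[np] := habove np h2 (le_refl np)
          have hkik : k ≤ ik := by omega
          -- minimality: no occurrence of c at an index in [k, ik)
          have hmin : ∀ (j' : Nat), k ≤ j' → j' < ik → ∀ (hj' : j' < sl.length), sl[j'] ≠ c := by
            intro j' hkj' hj'ik hj'len hcj'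
            have hmem : (j' : Int) ∈ lst := (mem_occ sl c _).mpr ⟨j', hj'len, rfl, hcj'⟩
            obtain ⟨p, hp, hpe⟩ := List.getElem_of_mem hmem
            by_cases hpn : p < np
            · have := hbelow p hp hpn
              omega
            · have hle : lst[np] ≤ lst[p] := by
                rcases Nat.eq_or_lt_of_le (Nat.le_of_not_lt hpn) with he | hlt
                · simp [← he]
                · exact (List.pairwise_iff_getElem.mp hsorted np p h2 hp hlt)
              omega
          have hik_len : ik < sl.length := hik
          -- split the suffix of s at position ik
          have hsplit : sl.drop k = (List.take (ik - k) (sl.drop k)) ++ sl[ik] :: sl.drop (ik + 1) := by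
            conv_lhs => rw [← List.take_append_drop (ik - k) (sl.drop k)]
            congr 1
            rw [List.drop_drop]
            have : k + (ik - k) = ik := by omega
            rw [this]
            exact List.drop_eq_getElem_cons hik_len
          rw [hsplit, List.foldl_append, List.foldl_cons]
          have hstuck : (List.take (ik - k) (sl.drop k)).foldl (stepB tl) hit = hit := by
            apply foldl_stepB_stuck tl _ hit h
            intro x hx
            obtain ⟨p, hp, hpe⟩ := List.getElem_of_mem hx
            have hplen : p < (List.take (ik - k) (sl.drop k)).length := hp
            have hbound : p < ik - k := by
              have := List.length_take_le (ik - k) (sl.drop k)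
              omega
            have hlen2 : k + p < sl.length := by omega
            have : (List.take (ik - k) (sl.drop k))[p] = sl[k + p] := by
              rw [List.getElem_take, List.getElem_drop]
            rw [← hpe, this]
            exact hmin (k + p) (by omega) (by omega) hlen2
          rw [hstuck]
          have hstep : stepB tl hit sl[ik] = hit + 1 := by
            simp [stepB, h, ← hc, hikc]
          rw [hstep]
          exact ih (hit + 1) (ik + 1) lst[np] (by omega) (by omega)
        · rw [dif_neg h2]
          -- no occurrence of c at any index ≥ k: B's pass is stuck at hit
          have hnone : ∀ x ∈ sl.drop k, x ≠ tl[hit] := by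
            intro x hx hxc
            obtain ⟨p, hp, hpe⟩ := List.getElem_of_mem hx
            have hplen : k + p < sl.length := by
              have := List.length_drop (l := sl) (i := k); omega
            have hxe : (sl.drop k)[p] = sl[k + p] := List.getElem_drop ..
            have hmem : ((k + p : Nat) : Int) ∈ lst :=
              (mem_occ sl c _).mpr ⟨k + p, hplen, rfl, by rw [← hxe, hpe, hxc]⟩
            obtain ⟨q, hq, hqe⟩ := List.getElem_of_mem hmem
            have : lst[q] ≤ prePos := hbelow q hq (by omega)
            omega
          exact (foldl_stepB_stuck tl _ hit h hnone).symm
      · rw [matchA, dif_neg h, foldl_stepB_of_done tl _ hit h]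

lemma matchA_eq_passB (sl tl : List Char) (hit : Nat) :
    matchA tl (buildIndexMap sl) (-1) hit = passB sl tl hit := by
  have := matchA_eq_foldl sl tl (tl.length - hit) hit 0 (-1) (le_refl _) (by norm_num)
  simpa [passB] using this

lemma loopA_eq_loopB (sl tl : List Char) :
    ∀ (fuel hit : Nat) (res : Int),
      loopA tl (buildIndexMap sl) fuel hit res = loopB sl tl fuel hit res := by
  intro fuel
  induction fuel with
  | zero => intro hit res; rfl
  | succ f ih =>
      intro hit res
      simp only [loopA, loopB, matchA_eq_passB]
      by_cases h : hit < tl.length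
      · simp [h, ih]
      · simp [h]

-- ===== VERDICT (by name: the statement is the Claim_ definition above) =====
theorem solve_spec : Claim_equal_solve := by
  intro s t _
  unfold Spec_solve solve solve_alt
  simp only [loopA_eq_loopB]
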